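-- pv_equiv track=rewrite | github.com/Khushi-S-29/Advent-of-Code-2025 | day12/part1.py | gen_masks
-- ===== SOURCE A (Python) =====
-- def gen_masks(vs, w, h):
--     out= []
--     for v in vs:
--         maxr =max(r for r, c in v)
--         maxc= max(c for r,c in v)
--         if maxr>= h or maxc >= w: continue
--         for r0 in range(h - maxr):
--             for c0 in range(w - maxc):
--                 m = 0
--                 for r, c in v:
--                     idx = (r0 + r) * w + (c0 + c)
--                     m|= (1 << idx)
--                 out.append(m)
--     return out
-- ===== SOURCE B (Python) =====
-- def gen_masks(vs, w, h):
--     # One base bitmask per fitting shape; every placement is produced by a running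
--     # shift (<<1 per column step, <<w per row step) instead of re-setting each cell.
--     res = []
--     for v in vs:
--         maxr = max(p[0] for p in v)
--         maxc = max(p[1] for p in v)
--         if maxr < h and maxc < w:
--             m = 0
--             for r, c in v:
--                 m |= 1 << (r * w + c)
--             rows = h - maxr
--             while rows > 0:
--                 row = m
--                 k = w - maxc
--                 while k > 0:
--                     res.append(row)
--                     row <<= 1
--                     k -= 1
--                 m <<= w
--                 rows -= 1
--     return res
-- ===== Notes on version B (the rewrite author's own statement) =====
-- stated objective: alternative
-- what changed: B builds one base bitmask per fitting shape and enumerates placements with two countdown while-loops that carry a running big-int (shift by 1 per column, by w per row), instead of A's indexed range loops that re-set every cell bit for each placement.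
-- outside the precondition, e.g. on gen_masks([[(-10, -2)]], -1, -8): A returns [256, 128], B raises ValueError
import Mathlib
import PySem

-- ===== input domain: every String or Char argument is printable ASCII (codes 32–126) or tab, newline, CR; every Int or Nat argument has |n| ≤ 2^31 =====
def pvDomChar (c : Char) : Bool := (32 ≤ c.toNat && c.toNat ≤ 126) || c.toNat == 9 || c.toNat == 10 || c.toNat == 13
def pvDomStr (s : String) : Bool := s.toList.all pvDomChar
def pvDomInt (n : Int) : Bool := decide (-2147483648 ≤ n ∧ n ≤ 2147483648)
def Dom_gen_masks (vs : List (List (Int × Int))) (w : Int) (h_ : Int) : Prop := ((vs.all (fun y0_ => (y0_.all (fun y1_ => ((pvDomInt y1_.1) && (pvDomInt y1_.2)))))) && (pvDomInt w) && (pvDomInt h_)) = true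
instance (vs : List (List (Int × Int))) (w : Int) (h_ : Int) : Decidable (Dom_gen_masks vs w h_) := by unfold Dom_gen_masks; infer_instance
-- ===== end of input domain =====

-- B builds one base bitmask per fitting shape and derives each placement with a running
-- big-int shift in countdown loops, instead of re-setting every cell bit per placement
-- (objective: alternative).

-- ===== PORT A =====
-- Python '1 << idx' raises ValueError for idx < 0; Pre_ guarantees idx ≥ 0 there, so '.toNat' is exact.
def pyAMask (v : List (Int × Int)) (w r0 c0 : Int) : Int :=
  v.foldl (fun m p => PySem.Int.bor m ((1 : Int) <<< ((r0 + p.1) * w + (c0 + p.2)).toNat)) 0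

-- one iteration of A's 'for v in vs' loop (max() of an empty shape raises in Python: outside Pre_)
def pyAStep (w h_ : Int) (out : List Int) (v : List (Int × Int)) : List Int :=
  match PySem.List.max? (v.map (fun p => p.1)) (fun x => x),
        PySem.List.max? (v.map (fun p => p.2)) (fun x => x) with
  | some maxr, some maxc =>
    if maxr ≥ h_ ∨ maxc ≥ w then out
    else
      (PySem.List.pyRange 0 (h_ - maxr) 1).foldl (fun out r0 =>
        (PySem.List.pyRange 0 (w - maxc) 1).foldl (fun out c0 =>
          out ++ [pyAMask v w r0 c0]) out) out
  | _, _ => out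

def gen_masks (vs : List (List (Int × Int))) (w : Int) (h_ : Int) : List Int :=
  vs.foldl (pyAStep w h_) []

-- ===== PORT B =====
-- Source B's 'm |= 1 << (r*w+c)' loop; Pre_ guarantees r*w+c ≥ 0 where this is reached.
def pyBBase (v : List (Int × Int)) (w : Int) : Int :=
  v.foldl (fun m p => PySem.Int.bor m ((1 : Int) <<< (p.1 * w + p.2).toNat)) 0

-- Source B's inner 'while k > 0' countdown: append the running value, shift it left by 1
def pyBCol (res : List Int) (row : Int) (k : Int) : List Int :=
  if 0 < k then pyBCol (res ++ [row]) (row <<< (1:Nat)) (k - 1) else res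
termination_by k.toNat
decreasing_by omega

-- Source B's outer 'while rows > 0' countdown: 'm <<= w' ported as '<<< w.toNat'
-- (exact because Pre_ guarantees 0 ≤ w wherever this line is reached; for w < 0 Python raises)
def pyBRow (w cols : Int) (res : List Int) (m : Int) (rows : Int) : List Int :=
  if 0 < rows then pyBRow w cols (pyBCol res m cols) (m <<< w.toNat) (rows - 1) else res
termination_by rows.toNat
decreasing_by omega

-- one iteration of B's 'for v in vs' loop
def pyBStep (w h_ : Int) (res : List Int) (v : List (Int × Int)) : List Int :=
  match PySem.List.max? (v.map (fun p => p.1)) (fun x => x),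
        PySem.List.max? (v.map (fun p => p.2)) (fun x => x) with
  | some maxr, some maxc =>
    if maxr < h_ ∧ maxc < w then
      pyBRow w (w - maxc) res (pyBBase v w) (h_ - maxr)
    else res
  | _, _ => res

def gen_masks_alt (vs : List (List (Int × Int))) (w : Int) (h_ : Int) : List Int :=
  vs.foldl (pyBStep w h_) []

-- ===== PRECONDITION & SPEC =====
-- Pre_ excludes: empty shapes (A's max() raises ValueError); shapes that fit the grid but have a
-- cell with bit index r*w+c < 0 (A's '1 << idx' raises ValueError); and fitting shapes with w < 0,
-- where A usually raises the same way but can occasionally return while B's row shift 'm <<= w'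
-- raises ValueError (see the cite in claim.json).
def Pre_gen_masks (vs : List (List (Int × Int))) (w : Int) (h_ : Int) : Prop :=
  ∀ v ∈ vs, v ≠ [] ∧
    (((∀ p ∈ v, p.1 < h_) ∧ (∀ p ∈ v, p.2 < w)) →
      0 ≤ w ∧ ∀ p ∈ v, 0 ≤ p.1 * w + p.2)
instance (vs : List (List (Int × Int))) (w : Int) (h_ : Int) : Decidable (Pre_gen_masks vs w h_) := by
  unfold Pre_gen_masks; infer_instance

def pvWitness_gen_masks : (List (List (Int × Int))) × Int × Int := ([[(0, 0), (0, 1)], [(1, 2)]], 3, 2)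

def Spec_gen_masks (vs : List (List (Int × Int))) (w : Int) (h_ : Int) (out : List Int) : Prop := out = gen_masks_alt vs w h_
instance (vs : List (List (Int × Int))) (w : Int) (h_ : Int) (out : List Int) : Decidable (Spec_gen_masks vs w h_ out) := by unfold Spec_gen_masks; infer_instance

-- ===== CLAIM (what is proved, stated in full; the proofs are below) =====
def Claim_equal_gen_masks : Prop := ∀ (vs : List (List (Int × Int))) (w : Int) (h_ : Int), Dom_gen_masks vs w h_ → Pre_gen_masks vs w h_ → Spec_gen_masks vs w h_ (gen_masks vs w h_)

-- ===== LEMMAS AND PROOFS =====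

theorem int_shiftLeft_natCast (m k : Nat) : ((m : Int) <<< k) = ((m <<< k : Nat) : Int) := by
  simp [Int.shiftLeft_eq, Nat.shiftLeft_eq]

theorem nat_lor_shiftLeft (m n k : Nat) : (m ||| n) <<< k = (m <<< k) ||| (n <<< k) := by
  apply Nat.eq_of_testBit_eq; intro i
  simp [Nat.testBit_shiftLeft, Nat.testBit_or]
  by_cases h : k ≤ i <;> simp [h]

theorem int_shiftLeft_add (a : Int) (j k : Nat) : a <<< (j + k) = (a <<< j) <<< k := by
  simp [Int.shiftLeft_eq, pow_add]; ring

theorem bor_shiftLeft (a b : Int) (ha : 0 ≤ a) (hb : 0 ≤ b) (k : Nat) :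
    (PySem.Int.bor a b) <<< k = PySem.Int.bor (a <<< k) (b <<< k) := by
  obtain ⟨m, rfl⟩ := Int.eq_ofNat_of_zero_le ha
  obtain ⟨n, rfl⟩ := Int.eq_ofNat_of_zero_le hb
  rw [PySem.Int.bor_natCast, int_shiftLeft_natCast, nat_lor_shiftLeft,
    int_shiftLeft_natCast, int_shiftLeft_natCast, PySem.Int.bor_natCast]

theorem bor_nonneg_of_nonneg (a b : Int) (ha : 0 ≤ a) (hb : 0 ≤ b) : 0 ≤ PySem.Int.bor a b := by
  obtain ⟨m, rfl⟩ := Int.eq_ofNat_of_zero_le ha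
  obtain ⟨n, rfl⟩ := Int.eq_ofNat_of_zero_le hb
  simp

theorem one_shiftLeft_nonneg (k : Nat) : (0 : Int) ≤ (1 : Int) <<< k := by
  rw [Int.shiftLeft_eq]; positivity

-- shifting the accumulator commutes with A's bit-setting loop (all bit indices nonnegative)
theorem fold_shift (v : List (Int × Int)) (w s : Int) (hs : 0 ≤ s)
    (hkey : ∀ p ∈ v, 0 ≤ p.1 * w + p.2) (init : Int) (hinit : 0 ≤ init) :
    v.foldl (fun m p => PySem.Int.bor m ((1 : Int) <<< (p.1 * w + p.2 + s).toNat)) (init <<< s.toNat)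
      = (v.foldl (fun m p => PySem.Int.bor m ((1 : Int) <<< (p.1 * w + p.2).toNat)) init) <<< s.toNat := by
  induction v generalizing init with
  | nil => rfl
  | cons q t ih =>
    simp only [List.foldl_cons]
    have hq : 0 ≤ q.1 * w + q.2 := hkey q (List.mem_cons_self ..)
    have htn : (q.1 * w + q.2 + s).toNat = (q.1 * w + q.2).toNat + s.toNat := by omega
    rw [htn, int_shiftLeft_add, ← bor_shiftLeft _ _ hinit (one_shiftLeft_nonneg _)]
    exact ih (fun p hp => hkey p (List.mem_cons_of_mem _ hp)) _
      (bor_nonneg_of_nonneg _ _ hinit (one_shiftLeft_nonneg _))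

theorem mask_eq (v : List (Int × Int)) (w r0 c0 : Int) (hw : 0 ≤ w) (hr0 : 0 ≤ r0) (hc0 : 0 ≤ c0)
    (hkey : ∀ p ∈ v, 0 ≤ p.1 * w + p.2) :
    pyAMask v w r0 c0 = (pyBBase v w <<< (r0 * w).toNat) <<< c0.toNat := by
  have hrw : 0 ≤ r0 * w := mul_nonneg hr0 hw
  have hs : 0 ≤ r0 * w + c0 := by omega
  have hsplit : (r0 * w + c0).toNat = (r0 * w).toNat + c0.toNat := by omega
  unfold pyAMask pyBBase
  have hfun : (fun (m : Int) (p : Int × Int) =>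
        PySem.Int.bor m ((1 : Int) <<< ((r0 + p.1) * w + (c0 + p.2)).toNat))
      = (fun (m : Int) (p : Int × Int) =>
        PySem.Int.bor m ((1 : Int) <<< (p.1 * w + p.2 + (r0 * w + c0)).toNat)) := by
    funext m p; congr 3; ring
  rw [hfun, ← int_shiftLeft_add, ← hsplit]
  have hfs := fold_shift v w (r0 * w + c0) hs hkey 0 le_rfl
  rw [show ((0 : Int) <<< (r0 * w + c0).toNat) = 0 from by simp [Int.shiftLeft_eq]] at hfs
  exact hfs

theorem mask_eq' (v : List (Int × Int)) (w r0 c0 : Int) (hw : 0 ≤ w) (hr0 : 0 ≤ r0) (hc0 : 0 ≤ c0)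
    (hkey : ∀ p ∈ v, 0 ≤ p.1 * w + p.2) :
    pyAMask v w r0 c0 = pyBBase v w * 2 ^ (r0 * w).toNat * 2 ^ c0.toNat := by
  rw [mask_eq v w r0 c0 hw hr0 hc0 hkey]
  simp [Int.shiftLeft_eq, mul_assoc]

-- B's column countdown appends row, row*2, row*4, …
theorem pyBCol_eq (res : List Int) (row : Int) (k : Int) :
    pyBCol res row k = res ++ (List.range k.toNat).map (fun i => row * 2 ^ i) := by
  by_cases hk : 0 < k
  · have hn : k.toNat = (k - 1).toNat + 1 := by omega
    rw [pyBCol, if_pos hk, pyBCol_eq (res ++ [row]) (row <<< (1:Nat)) (k - 1), hn,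
      List.range_succ_eq_map]
    simp only [List.map_cons, List.map_map, List.append_assoc, List.singleton_append,
      pow_zero, mul_one]
    congr 2
    apply List.map_congr_left; intro i _
    simp only [Function.comp_apply, Int.shiftLeft_eq, pow_succ]
    ring
  · rw [pyBCol, if_neg hk]
    simp [show k.toNat = 0 from by omega]
termination_by k.toNat
decreasing_by omega

-- B's row countdown produces the rows' placements back to back
theorem pyBRow_eq (w cols : Int) (res : List Int) (m : Int) (rows : Int) :
    pyBRow w cols res m rows
      = res ++ (List.range rows.toNat).flatMap (fun j =>
          (List.range cols.toNat).map (fun i => m * 2 ^ (j * w.toNat) * 2 ^ i)) := by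
  by_cases hr : 0 < rows
  · have hn : rows.toNat = (rows - 1).toNat + 1 := by omega
    rw [pyBRow, if_pos hr, pyBRow_eq w cols (pyBCol res m cols) (m <<< w.toNat) (rows - 1),
      pyBCol_eq, hn, List.range_succ_eq_map]
    simp only [List.flatMap_cons, List.flatMap_map, List.append_assoc,
      Nat.zero_mul, pow_zero, mul_one]
    congr 1
    congr 1
    apply List.flatMap_congr
    intro j _
    apply List.map_congr_left; intro i _
    have hsucc : (j + 1) * w.toNat = w.toNat + j * w.toNat := by ring
    simp only [Nat.succ_eq_add_one, hsucc, pow_add, Int.shiftLeft_eq]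
    ring
  · rw [pyBRow, if_neg hr]
    simp [show rows.toNat = 0 from by omega]
termination_by rows.toNat
decreasing_by omega

theorem step_eq (w h_ : Int) (v : List (Int × Int))
    (hfit : ((∀ p ∈ v, p.1 < h_) ∧ (∀ p ∈ v, p.2 < w)) → 0 ≤ w ∧ ∀ p ∈ v, 0 ≤ p.1 * w + p.2)
    (out : List Int) : pyAStep w h_ out v = pyBStep w h_ out v := by
  unfold pyAStep pyBStep
  cases hmr : PySem.List.max? (v.map (fun p => p.1)) (fun x => x) with
  | none => rfl
  | some maxr =>
    cases hmc : PySem.List.max? (v.map (fun p => p.2)) (fun x => x) with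
    | none => rfl
    | some maxc =>
      simp only
      by_cases hskip : maxr ≥ h_ ∨ maxc ≥ w
      · rw [if_pos hskip, if_neg (by omega : ¬(maxr < h_ ∧ maxc < w))]
      · rw [not_or, not_le, not_le] at hskip
        obtain ⟨hw, hkey⟩ := hfit ⟨
          fun p hp => lt_of_le_of_lt
            (PySem.List.max?_isMax hmr p.1 (List.mem_map_of_mem hp)) hskip.1,
          fun p hp => lt_of_le_of_lt
            (PySem.List.max?_isMax hmc p.2 (List.mem_map_of_mem hp)) hskip.2⟩
        rw [if_neg (by omega : ¬(maxr ≥ h_ ∨ maxc ≥ w)), if_pos (by omega : maxr < h_ ∧ maxc < w)]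
        -- A's nested range-foldl as an append of a flatMap
        have hinner : ∀ (acc : List Int) (r0 : Int),
            (PySem.List.pyRange 0 (w - maxc) 1).foldl
              (fun out c0 => out ++ [pyAMask v w r0 c0]) acc
            = acc ++ (PySem.List.pyRange 0 (w - maxc) 1).map (pyAMask v w r0) := by
          intro acc r0; exact PySem.List.foldl_append_singleton_eq_map ..
        calc (PySem.List.pyRange 0 (h_ - maxr) 1).foldl (fun out r0 =>
                (PySem.List.pyRange 0 (w - maxc) 1).foldl
                  (fun out c0 => out ++ [pyAMask v w r0 c0]) out) out
            = (PySem.List.pyRange 0 (h_ - maxr) 1).foldl (fun out r0 =>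
                out ++ (PySem.List.pyRange 0 (w - maxc) 1).map (pyAMask v w r0)) out := by
              apply PySem.List.foldl_congr_mem; intro acc r0 _; exact hinner acc r0
          _ = out ++ (PySem.List.pyRange 0 (h_ - maxr) 1).flatMap (fun r0 =>
                (PySem.List.pyRange 0 (w - maxc) 1).map (pyAMask v w r0)) :=
              PySem.List.foldl_append_eq_flatMap ..
          _ = pyBRow w (w - maxc) out (pyBBase v w) (h_ - maxr) := by
              rw [pyBRow_eq]
              congr 1
              rw [PySem.List.pyRange_one 0 (h_ - maxr), List.flatMap_map]
              simp only [Int.sub_zero]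
              apply List.flatMap_congr
              intro j _
              rw [PySem.List.pyRange_one 0 (w - maxc), List.map_map]
              simp only [Int.sub_zero]
              apply List.map_congr_left; intro i _
              simp only [Function.comp_apply, zero_add]
              rw [mask_eq' v w (j : Int) (i : Int) hw (by positivity) (by positivity) hkey]
              have hjw : (((j : Int)) * w).toNat = j * w.toNat := by
                conv_lhs => rw [show w = ((w.toNat : Int)) from (Int.toNat_of_nonneg hw).symm]
                norm_cast
              rw [hjw, Int.toNat_natCast]

-- ===== VERDICT (by name: the statement is the Claim_ definition above) =====
theorem gen_masks_spec : Claim_equal_gen_masks := by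
  intro vs w h_ _hdom hpre
  unfold Spec_gen_masks gen_masks gen_masks_alt
  apply PySem.List.foldl_congr_mem
  intro out v hv
  exact step_eq w h_ v (hpre v hv).2 out
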